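-- pv_equiv track=rewrite | github.com/burxtx/s40ng | source/test_scripts/cs_util.py | cpf2phone
-- ===== SOURCE A (Python) =====
-- def cpf2phone(s):
--     # used for converting media file type name to phone displayed
--     s_words = s.split(" ")
--     new_words = []
--     new_words.append(s_words[0])
--     for word in s_words[1:]:
--         new_word = word.lower()
--         new_words.append(new_word)
--     return " ".join(new_words)
-- ===== SOURCE B (Python) =====
-- def cpf2phone(s):
--     first, sep, rest = s.partition(" ")
--     return first + sep + rest.lower()
-- ===== Notes on version B (the rewrite author's own statement) =====
-- stated objective: simpler
-- what changed: Replaces the split-into-words / accumulate-loop / join pipeline with a single partition at the first space, lowercasing the whole remaining suffix in one operation (lowercasing spaces is the identity, so no per-word iteration is needed).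
import Mathlib
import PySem

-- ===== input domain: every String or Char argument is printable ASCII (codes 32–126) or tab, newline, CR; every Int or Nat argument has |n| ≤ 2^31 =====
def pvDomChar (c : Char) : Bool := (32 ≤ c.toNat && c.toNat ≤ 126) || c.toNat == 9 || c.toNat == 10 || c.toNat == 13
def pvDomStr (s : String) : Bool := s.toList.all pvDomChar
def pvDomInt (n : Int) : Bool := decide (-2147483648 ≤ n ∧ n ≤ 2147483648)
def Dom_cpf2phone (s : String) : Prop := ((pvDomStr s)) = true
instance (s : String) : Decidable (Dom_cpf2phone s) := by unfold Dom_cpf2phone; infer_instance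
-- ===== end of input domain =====

-- B replaces A's split / per-word lowering loop / join with one partition at the first
-- space, lowercasing the whole remainder at once (objective: simpler; same return value).

-- ===== PORT A =====
-- s.split(" "): sep is nonempty so split? is `some`; `.getD []` only discharges the Option.
-- s_words[0]: split always returns a nonempty list, so pyGet? is `some`; `.getD ""` unreachable.
def cpf2phone (s : String) : String :=
  let s_words : List String := (PySem.Str.split? s " ").getD []
  let new_words : List String :=
    (PySem.List.slice s_words (some 1) none).foldl
      (fun acc word => acc ++ [PySem.Str.lower word])
      [(PySem.List.pyGet? s_words 0).getD ""]
  PySem.Str.join " " new_words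

-- ===== PORT B =====
-- s.partition(" ") ported by hand (PySem has no partition): first = chars before the first
-- space, and the match distinguishes "no space found" (sep = rest = '') from "found"
-- (sep = ' ', rest = everything after it); exact on all strings.
def cpf2phone_alt (s : String) : String :=
  let cs := s.toList
  let first := cs.takeWhile (fun c => c ≠ ' ')
  match cs.dropWhile (fun c => c ≠ ' ') with
  | [] => String.ofList first
  | _ :: rest => String.ofList (first ++ [' '] ++ PySem.Chars.lower rest)

-- ===== PRECONDITION & SPEC =====
def Spec_cpf2phone (s : String) (out : String) : Prop := out = cpf2phone_alt s
instance (s : String) (out : String) : Decidable (Spec_cpf2phone s out) := by unfold Spec_cpf2phone; infer_instance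

-- ===== CLAIM (what is proved, stated in full; the proofs are below) =====
def Claim_equal_cpf2phone : Prop := ∀ (s : String), Dom_cpf2phone s → Spec_cpf2phone s (cpf2phone s)

-- ===== LEMMAS AND PROOFS =====

-- Reference splitter: Python's s.split(" ") on the char-list level (keeps empty pieces).
def pvSplitSp : List Char → List (List Char)
  | [] => [[]]
  | c :: l =>
    if c = ' ' then [] :: pvSplitSp l
    else
      match pvSplitSp l with
      | [] => [[c]]
      | w :: ws => (c :: w) :: ws

def pvConsFirst (p : List Char) : List (List Char) → List (List Char)
  | [] => [p]
  | w :: ws => (p ++ w) :: ws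

theorem pvSplitSp_ne_nil (l : List Char) : pvSplitSp l ≠ [] := by
  cases l with
  | nil => simp [pvSplitSp]
  | cons c l =>
    simp only [pvSplitSp]
    split_ifs
    · simp
    · cases h : pvSplitSp l <;> simp

theorem pvConsFirst_nil (ws : List (List Char)) (h : ws ≠ []) : pvConsFirst [] ws = ws := by
  cases ws with
  | nil => exact absurd rfl h
  | cons w ws => simp [pvConsFirst]

theorem pv_go_spec : ∀ (fuel : Nat) (l cur : List Char) (acc : List (List Char)),
    l.length < fuel →
    PySem.Chars.splitOn.go [' '] fuel l cur acc
      = acc.reverse ++ pvConsFirst cur.reverse (pvSplitSp l) := by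
  intro fuel
  induction fuel with
  | zero => intro l cur acc h; omega
  | succ fuel ih =>
    intro l cur acc h
    cases l with
    | nil =>
      simp [PySem.Chars.splitOn.go, pvSplitSp, pvConsFirst]
    | cons c rest =>
      rw [PySem.Chars.splitOn.go]
      by_cases hc : c = ' '
      · have hp : List.isPrefixOf [' '] (c :: rest) = true := by
          simp [List.isPrefixOf, hc]
        rw [if_pos hp]
        have := ih rest [] (cur.reverse :: acc) (by simp at h ⊢; omega)
        simp only [List.length_cons, List.length_nil, List.drop_succ_cons, List.drop_zero]
        rw [this]
        simp only [List.reverse_cons, List.reverse_nil, pvSplitSp, if_pos hc,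
          List.append_assoc, List.singleton_append]
        cases hr : pvSplitSp rest with
        | nil => exact absurd hr (pvSplitSp_ne_nil rest)
        | cons w ws => simp [pvConsFirst]
      · have hp : List.isPrefixOf [' '] (c :: rest) = false := by
          simp [List.isPrefixOf]
          exact fun h' => absurd h'.symm hc
        rw [if_neg (by simp [hp])]
        have := ih rest (c :: cur) acc (by simp at h ⊢; omega)
        rw [this]
        simp only [pvSplitSp, if_neg hc]
        cases hs : pvSplitSp rest with
        | nil => exact absurd hs (pvSplitSp_ne_nil rest)
        | cons w ws => simp [pvConsFirst]

theorem pv_splitOn_space (l : List Char) :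
    PySem.Chars.splitOn l [' '] = pvSplitSp l := by
  unfold PySem.Chars.splitOn
  rw [pv_go_spec (l.length + 1) l [] [] (by omega)]
  simp [pvConsFirst_nil _ (pvSplitSp_ne_nil l)]

-- Splitting at spaces, lowercasing each piece and rejoining with ' ' lowercases the string.
theorem pv_join_lower (l : List Char) :
    PySem.Chars.join [' '] ((pvSplitSp l).map PySem.Chars.lower) = PySem.Chars.lower l := by
  induction l with
  | nil => simp [pvSplitSp, PySem.Chars.lower, PySem.Chars.join_singleton]
  | cons c l ih =>
    by_cases hc : c = ' '
    · subst hc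
      rw [show pvSplitSp (' ' :: l) = [] :: pvSplitSp l from by simp [pvSplitSp]]
      rw [List.map_cons]
      cases hs : (pvSplitSp l).map PySem.Chars.lower with
      | nil => exact absurd (List.map_eq_nil_iff.mp hs) (pvSplitSp_ne_nil l)
      | cons w ws =>
        rw [PySem.Chars.join_cons_cons, ← hs, ih]
        simp [PySem.Chars.lower, PySem.Chars.lowerChar, PySem.Chars.isupper]
    · simp only [pvSplitSp, if_neg hc]
      cases hs : pvSplitSp l with
      | nil => exact absurd hs (pvSplitSp_ne_nil l)
      | cons w ws =>
        rw [hs] at ih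
        cases ws with
        | nil =>
          simp only [List.map_cons, List.map_nil, PySem.Chars.join_singleton] at ih ⊢
          simp only [PySem.Chars.lower, List.map_cons]
          simpa [PySem.Chars.lower] using ih
        | cons w' ws' =>
          simp only [List.map_cons, PySem.Chars.join_cons_cons] at ih ⊢
          simp [PySem.Chars.lower] at ih ⊢
          simp [ih]

-- pvSplitSp in terms of the first space: head is takeWhile, tail comes from after the space.
theorem pv_split_take_drop (l : List Char) :
    pvSplitSp l =
      l.takeWhile (fun c => c ≠ ' ')
        :: (match l.dropWhile (fun c => c ≠ ' ') with
            | [] => []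
            | _ :: r => pvSplitSp r) := by
  induction l with
  | nil => simp [pvSplitSp]
  | cons c l ih =>
    by_cases hc : c = ' '
    · subst hc
      simp [pvSplitSp, List.takeWhile, List.dropWhile]
    · simp only [pvSplitSp, if_neg hc, List.takeWhile, List.dropWhile]
      rw [ih]
      simp [hc]

theorem pv_foldl_append_lower (init : List String) (l : List String) :
    l.foldl (fun acc word => acc ++ [PySem.Str.lower word]) init
      = init ++ l.map PySem.Str.lower := by
  induction l generalizing init with
  | nil => simp
  | cons w ws ih => simp [ih]

-- ===== VERDICT (by name: the statement is the Claim_ definition above) =====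
theorem cpf2phone_spec : Claim_equal_cpf2phone := by
  intro s _
  unfold Spec_cpf2phone cpf2phone cpf2phone_alt
  have hsw : (PySem.Str.split? s " ").getD []
      = (pvSplitSp s.toList).map String.ofList := by
    simp [PySem.Str.split?, PySem.Chars.split?, pv_splitOn_space,
      show (" ".toList) = [' '] from rfl]
  simp only [hsw]
  rw [pv_split_take_drop s.toList]
  cases hd : s.toList.dropWhile (fun c => c ≠ ' ') with
  | nil =>
    simp only [List.map_cons, List.map_nil]
    rw [PySem.List.slice_from _ (by norm_num)]
    simp [PySem.List.pyGet?, PySem.List.pyIdx?,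
      PySem.Str.join, PySem.Chars.join_singleton]
  | cons d r =>
    simp only [List.map_cons]
    rw [PySem.List.slice_from _ (by norm_num)]
    simp only [pv_foldl_append_lower]
    have hne := pvSplitSp_ne_nil r
    cases hs : pvSplitSp r with
    | nil => exact absurd hs hne
    | cons w ws =>
      simp only [List.map_cons, List.singleton_append]
      simp only [PySem.List.pyGet?, PySem.List.pyIdx?, PySem.Str.join]
      have hjoin := pv_join_lower r
      rw [hs] at hjoin
      simp only [List.map_cons] at hjoin
      have hmap : List.map (String.toList ∘ PySem.Str.lower ∘ String.ofList) ws
          = List.map PySem.Chars.lower ws := by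
        simp [Function.comp_def, PySem.Str.lower]
      simp [PySem.Chars.join_cons_cons, ← hjoin, hmap,
        show (0:Int) ≤ (ws.length:Int) + 1 from by positivity,
        show (" ".toList) = [' '] from rfl]
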